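-- pv_equiv track=rewrite | github.com/kazzand/ouroboros-desktop | ouroboros/improvement_backlog.py | _parse_backlog_items
-- ===== SOURCE A (Python) =====
-- from typing import Any, Dict, Iterator, List
--
-- def _parse_backlog_items(text: str) -> List[Dict[str, str]]:
--     items: List[Dict[str, str]] = []
--     current: Dict[str, str] | None = None
--
--     for raw_line in text.splitlines():
--         line = raw_line.rstrip()
--         if line.startswith("### "):
--             if current:
--                 items.append(current)
--             current = {"id": line[4:].strip()}
--             continue
--         if current is None:
--             continue
--         if line.startswith("- ") and ": " in line:
--             key, value = line[2:].split(": ", 1)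
--             current[key.strip()] = value.strip()
--
--     if current:
--         items.append(current)
--     return items
-- ===== SOURCE B (Python) =====
-- from typing import Dict, List, Tuple
--
--
-- def _split_at_header(lines: List[str]) -> Tuple[List[str], List[str]]:
--     """Split lines into (prefix before the first '### ' header, rest from that header)."""
--     for i, line in enumerate(lines):
--         if line.startswith("### "):
--             return lines[:i], lines[i:]
--     return lines, []
--
--
-- def _sections(lines: List[str]) -> List[Tuple[str, List[str]]]:
--     """lines is empty or starts with a header; return (header, body) pairs recursively."""
--     if not lines:
--         return []
--     header = lines[0][4:].strip()
--     body, rest = _split_at_header(lines[1:])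
--     return [(header, body)] + _sections(rest)
--
--
-- def _item(header: str, body: List[str]) -> Dict[str, str]:
--     item = {"id": header}
--     for line in body:
--         if line.startswith("- ") and ": " in line:
--             key, value = line[2:].split(": ", 1)
--             item[key.strip()] = value.strip()
--     return item
--
--
-- def _parse_backlog_items(text: str) -> List[Dict[str, str]]:
--     lines = [l.rstrip() for l in text.splitlines()]
--     _, lines = _split_at_header(lines)
--     return [_item(h, b) for h, b in _sections(lines)]
-- ===== Notes on version B (the rewrite author's own statement) =====
-- stated objective: alternative
-- what changed: A's single stateful line-scan (an open 'current' dict mutated and flushed on the fly) is replaced by a two-phase decomposition: recursively split the rstripped lines into (header, body) sections at header-marker boundaries, then build each item's dict independently from its own body.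
import Mathlib
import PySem

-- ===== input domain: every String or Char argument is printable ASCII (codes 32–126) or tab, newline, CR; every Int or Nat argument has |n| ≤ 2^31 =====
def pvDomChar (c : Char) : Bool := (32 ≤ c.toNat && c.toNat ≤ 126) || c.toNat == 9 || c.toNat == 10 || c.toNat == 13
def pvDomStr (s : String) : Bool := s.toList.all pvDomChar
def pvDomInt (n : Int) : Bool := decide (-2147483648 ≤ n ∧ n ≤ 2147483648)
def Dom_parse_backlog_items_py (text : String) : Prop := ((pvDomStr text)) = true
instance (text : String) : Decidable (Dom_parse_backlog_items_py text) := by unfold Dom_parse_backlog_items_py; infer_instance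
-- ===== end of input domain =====

-- B re-decomposes A's single stateful scan into two phases — recursively split the lines into
-- (header, body) sections, then build each item dict independently — same return value, no speed claim.


-- ===== PORT A =====
-- the body of A's loop after 'line = raw_line.rstrip()' (the '_' fallback of the split match is
-- unreachable: '": " in line' with 'line.startswith("- ")' forces the split to yield two parts)
def pvStepACore (st : List (PySem.Dict String String) × Option (PySem.Dict String String))
    (line : String) : List (PySem.Dict String String) × Option (PySem.Dict String String) :=
  if PySem.Str.startswith line "### " then
    let items := match st.2 with
      | some d => if d.size ≠ 0 then st.1 ++ [d] else st.1
      | none => st.1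
    (items, some (PySem.Dict.empty.insert "id" (PySem.Str.strip (PySem.Str.slice line (some 4) none))))
  else
    match st.2 with
    | none => st
    | some d =>
      if PySem.Str.startswith line "- " && PySem.Str.isIn ": " line then
        match PySem.Str.splitMax? (PySem.Str.slice line (some 2) none) ": " 1 with
        | some (key :: value :: _) =>
            (st.1, some (d.insert (PySem.Str.strip key) (PySem.Str.strip value)))
        | _ => st
      else st

-- one loop step of A: rstrip the raw line, then the branch work above
def pvStepA (st : List (PySem.Dict String String) × Option (PySem.Dict String String))
    (raw : String) : List (PySem.Dict String String) × Option (PySem.Dict String String) :=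
  pvStepACore st (PySem.Str.rstrip raw)

def parse_backlog_items_py (text : String) : List (List (String × String)) :=
  let st := (PySem.Str.splitlines text).foldl pvStepA ([], none)
  let items := match st.2 with
    | some d => if d.size ≠ 0 then st.1 ++ [d] else st.1
    | none => st.1
  items.map (·.items)

-- ===== PORT B =====
def pvIsHeader (line : String) : Bool := PySem.Str.startswith line "### "

-- _split_at_header: the index-scan-and-slice is ported as (takeWhile, dropWhile)
def pvSplitAtHeader (lines : List String) : List String × List String :=
  (lines.takeWhile (fun l => !pvIsHeader l), lines.dropWhile (fun l => !pvIsHeader l))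

def pvSections (lines : List String) : List (String × List String) :=
  match lines with
  | [] => []
  | h :: rest =>
    let p := pvSplitAtHeader rest
    [(PySem.Str.strip (PySem.Str.slice h (some 4) none), p.1)] ++ pvSections p.2
termination_by lines.length
decreasing_by
  simp only [pvSplitAtHeader]
  exact Nat.lt_succ_of_le (List.length_dropWhile_le _ rest)

-- one body line of _item (the '_' fallback is unreachable, as in A)
def pvKV (item : PySem.Dict String String) (line : String) : PySem.Dict String String :=
  if PySem.Str.startswith line "- " && PySem.Str.isIn ": " line then
    match PySem.Str.splitMax? (PySem.Str.slice line (some 2) none) ": " 1 with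
    | some (key :: value :: _) => item.insert (PySem.Str.strip key) (PySem.Str.strip value)
    | _ => item
  else item

def pvItem (header : String) (body : List String) : PySem.Dict String String :=
  body.foldl pvKV (PySem.Dict.empty.insert "id" header)

def parse_backlog_items_py_alt (text : String) : List (List (String × String)) :=
  let lines := (PySem.Str.splitlines text).map PySem.Str.rstrip
  let lines2 := (pvSplitAtHeader lines).2
  (pvSections lines2).map (fun s => (pvItem s.1 s.2).items)

-- ===== PRECONDITION & SPEC =====
def Spec_parse_backlog_items_py (text : String) (out : List (List (String × String))) : Prop := out = parse_backlog_items_py_alt text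
instance (text : String) (out : List (List (String × String))) : Decidable (Spec_parse_backlog_items_py text out) := by unfold Spec_parse_backlog_items_py; infer_instance

-- ===== CLAIM (what is proved, stated in full; the proofs are below) =====
def Claim_equal_parse_backlog_items_py : Prop := ∀ (text : String), Dom_parse_backlog_items_py text → Spec_parse_backlog_items_py text (parse_backlog_items_py text)

-- ===== LEMMAS AND PROOFS =====

lemma pvInsert_size_pos (d : PySem.Dict String String) (k v : String) :
    0 < (d.insert k v).size := by
  simp only [PySem.Dict.size, PySem.Dict.insert]
  split_ifs with h
  · simp only [List.length_map]
    rcases d with ⟨items⟩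
    cases items with
    | nil => simp [PySem.Dict.contains] at h
    | cons a t => simp
  · simp

lemma pvKV_size_pos {d : PySem.Dict String String} (h : 0 < d.size) (line : String) :
    0 < (pvKV d line).size := by
  unfold pvKV
  split_ifs with hb
  · rcases hsp : PySem.Str.splitMax? (PySem.Str.slice line (some 2) none) ": " 1 with _ | l
    · simpa [hsp] using h
    · rcases l with _ | ⟨k, _ | ⟨v, rest⟩⟩ <;> simp [hsp, h, pvInsert_size_pos]
  · exact h

-- finalize of A's loop state (the code after the loop)
def pvFin (st : List (PySem.Dict String String) × Option (PySem.Dict String String)) :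
    List (PySem.Dict String String) :=
  match st.2 with
  | some d => if d.size ≠ 0 then st.1 ++ [d] else st.1
  | none => st.1

-- pvStepACore with an open section behaves as: close on header, pvKV otherwise
lemma pvStepACore_header {st : List (PySem.Dict String String) × Option (PySem.Dict String String)}
    {line : String} (h : pvIsHeader line = true) :
    pvStepACore st line =
      (pvFin st, some (PySem.Dict.empty.insert "id"
        (PySem.Str.strip (PySem.Str.slice line (some 4) none)))) := by
  rcases st with ⟨items, cur⟩
  have hs : PySem.Str.startswith line "### " = true := h
  cases cur <;>
  · unfold pvStepACore pvFin
    rw [if_pos hs]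

lemma pvStepACore_body {items : List (PySem.Dict String String)}
    {d : PySem.Dict String String} {line : String} (h : pvIsHeader line = false) :
    pvStepACore (items, some d) line = (items, some (pvKV d line)) := by
  have hs : PySem.Str.startswith line "### " = false := h
  unfold pvStepACore pvKV
  rw [if_neg (by rw [hs]; exact Bool.false_ne_true)]
  split_ifs with hb
  · rcases hsp : PySem.Str.splitMax? (PySem.Str.slice line (some 2) none) ": " 1 with _ | l
    · simp
    · rcases l with _ | ⟨k, _ | ⟨v, rest⟩⟩ <;> simp
  · rfl

-- the main loop invariant: an open section d absorbs body lines until the next header,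
-- then the tail of the run is exactly B's remaining sections
lemma pvMain (lines : List String) (items : List (PySem.Dict String String))
    (d : PySem.Dict String String) (hd : 0 < d.size) :
    pvFin (lines.foldl pvStepACore (items, some d)) =
      items ++ [(lines.takeWhile (fun l => !pvIsHeader l)).foldl pvKV d]
        ++ (pvSections (lines.dropWhile (fun l => !pvIsHeader l))).map
              (fun s => pvItem s.1 s.2) := by
  induction lines generalizing items d with
  | nil =>
    simp [pvFin, pvSections, Nat.pos_iff_ne_zero.mp hd]
  | cons l rest ih =>
    by_cases hl : pvIsHeader l = true
    · rw [List.foldl_cons, pvStepACore_header hl]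
      rw [ih _ _ (pvInsert_size_pos _ _ _)]
      simp [List.dropWhile_cons, hl, pvSections, pvSplitAtHeader, pvItem,
        pvFin, Nat.pos_iff_ne_zero.mp hd]
    · replace hl : pvIsHeader l = false := by simpa using hl
      rw [List.foldl_cons, pvStepACore_body hl, ih _ _ (pvKV_size_pos hd l)]
      simp [List.takeWhile_cons, hl]

-- before the first header the state stays ([], none)
lemma pvStart (lines : List String) :
    pvFin (lines.foldl pvStepACore ([], none)) =
      (pvSections (lines.dropWhile (fun l => !pvIsHeader l))).map
        (fun s => pvItem s.1 s.2) := by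
  induction lines with
  | nil => simp [pvFin, pvSections]
  | cons l rest ih =>
    by_cases hl : pvIsHeader l = true
    · rw [List.foldl_cons, pvStepACore_header hl]
      rw [pvMain _ _ _ (pvInsert_size_pos _ _ _)]
      simp [hl, pvSections, pvSplitAtHeader, pvItem, pvFin]
    · replace hl : pvIsHeader l = false := by simpa using hl
      have : pvStepACore ([], none) l = ([], none) := by
        have hls : PySem.Str.startswith l "### " = false := hl
        unfold pvStepACore
        rw [if_neg (by rw [hls]; exact Bool.false_ne_true)]
      rw [List.foldl_cons, this, ih]
      simp [hl]

-- ===== VERDICT (by name: the statement is the Claim_ definition above) =====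
theorem parse_backlog_items_py_spec : Claim_equal_parse_backlog_items_py := by
  intro text _
  unfold Spec_parse_backlog_items_py parse_backlog_items_py parse_backlog_items_py_alt
  have hfold : (PySem.Str.splitlines text).foldl pvStepA ([], none) =
      ((PySem.Str.splitlines text).map PySem.Str.rstrip).foldl pvStepACore ([], none) := by
    rw [List.foldl_map]
    rfl
  rw [hfold]
  have := pvStart ((PySem.Str.splitlines text).map PySem.Str.rstrip)
  simp only [pvFin] at this
  simp only [pvSplitAtHeader]
  rw [this]
  simp
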